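-- pv_equiv track=rewrite | github.com/ReZeroE/Chess-Engine | BestChessEver/main.py | sqare_clicked
-- ===== SOURCE A (Python) =====
-- Display_Width = 800
--
-- Display_Height = 800
--
-- Block_Width = Display_Width // 8
--
-- Block_Height = Display_Height // 8
--
-- def sqare_clicked(mouse_pos):
--     sqr_clicked = []
--     for i in range(0, Display_Width, Block_Width):
--         if i <= mouse_pos[0] < i + Block_Width:
--             sqr_clicked.append(i)
--     for j in range(0, Display_Height, Block_Height):
--         if j <= mouse_pos[1] < j + Block_Height:
--             sqr_clicked.append(j)
--
--     return sqr_clicked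
-- ===== SOURCE B (Python) =====
-- Display_Width = 800
--
-- Display_Height = 800
--
-- Block_Width = Display_Width // 8
--
-- Block_Height = Display_Height // 8
--
-- def sqare_clicked(mouse_pos):
--     res = []
--     x = mouse_pos[0]
--     y = mouse_pos[1]
--     if 0 <= x < Display_Width:
--         res.append(int(x // Block_Width) * Block_Width)
--     if 0 <= y < Display_Height:
--         res.append(int(y // Block_Height) * Block_Height)
--     return res
-- ===== Notes on version B (the rewrite author's own statement) =====
-- stated objective: simpler
-- what changed: Replaced the two 8-step scanning loops over candidate block origins with a guarded closed-form floor-division (x // Block_Width * Block_Width per axis).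
import Mathlib
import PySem

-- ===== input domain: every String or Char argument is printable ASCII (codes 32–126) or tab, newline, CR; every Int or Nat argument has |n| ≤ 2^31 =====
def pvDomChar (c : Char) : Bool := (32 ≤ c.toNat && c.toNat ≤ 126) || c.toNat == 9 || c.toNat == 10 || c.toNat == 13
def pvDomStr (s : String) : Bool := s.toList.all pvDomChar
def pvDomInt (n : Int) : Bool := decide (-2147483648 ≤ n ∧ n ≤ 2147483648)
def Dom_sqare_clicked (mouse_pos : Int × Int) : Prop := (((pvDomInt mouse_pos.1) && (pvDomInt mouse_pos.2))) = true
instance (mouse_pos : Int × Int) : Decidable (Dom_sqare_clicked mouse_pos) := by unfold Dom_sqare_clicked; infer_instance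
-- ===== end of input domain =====

-- B replaces A's two fixed 8-step scans over block origins with a guarded closed-form
-- floor-division per axis (simpler; same result).

-- ===== PORT A =====
def sqare_clicked (mouse_pos : Int × Int) : List Int :=
  let sqr0 : List Int := []
  let sqr1 := (PySem.List.pyRange 0 800 100).foldl
    (fun acc i => if i ≤ mouse_pos.1 ∧ mouse_pos.1 < i + 100 then acc ++ [i] else acc) sqr0
  (PySem.List.pyRange 0 800 100).foldl
    (fun acc j => if j ≤ mouse_pos.2 ∧ mouse_pos.2 < j + 100 then acc ++ [j] else acc) sqr1

-- ===== PORT B =====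
def sqare_clicked_alt (mouse_pos : Int × Int) : List Int :=
  let x := mouse_pos.1
  let y := mouse_pos.2
  (if 0 ≤ x ∧ x < 800 then [PySem.Int.floordiv x 100 * 100] else []) ++
  (if 0 ≤ y ∧ y < 800 then [PySem.Int.floordiv y 100 * 100] else [])

-- ===== PRECONDITION & SPEC =====
def Spec_sqare_clicked (mouse_pos : Int × Int) (out : List Int) : Prop := out = sqare_clicked_alt mouse_pos
instance (mouse_pos : Int × Int) (out : List Int) : Decidable (Spec_sqare_clicked mouse_pos out) := by unfold Spec_sqare_clicked; infer_instance

-- ===== CLAIM (what is proved, stated in full; the proofs are below) =====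
def Claim_equal_sqare_clicked : Prop := ∀ (mouse_pos : Int × Int), Dom_sqare_clicked mouse_pos → Spec_sqare_clicked mouse_pos (sqare_clicked mouse_pos)

-- ===== LEMMAS AND PROOFS =====

lemma pyRange_800_100 : PySem.List.pyRange 0 800 100 = [0, 100, 200, 300, 400, 500, 600, 700] := by
  decide

set_option maxHeartbeats 1600000 in
lemma axis_fold (x : Int) (acc : List Int) :
    (PySem.List.pyRange 0 800 100).foldl
      (fun a i => if i ≤ x ∧ x < i + 100 then a ++ [i] else a) acc
    = acc ++ (if 0 ≤ x ∧ x < 800 then [PySem.Int.floordiv x 100 * 100] else []) := by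
  have hd := PySem.Int.floordiv_mul_add_mod x 100
  have hm0 := PySem.Int.mod_nonneg x (b := 100) (by norm_num)
  have hm1 := PySem.Int.mod_lt x (b := 100) (by norm_num)
  rw [pyRange_800_100, PySem.List.foldl_append_ite_eq_filter]
  congr 1
  simp only [List.filter_cons, List.filter_nil, decide_eq_true_eq]
  split_ifs <;> first
    | rfl
    | (exfalso; omega)
    | (simp only [List.cons.injEq, and_true]; omega)

theorem sqare_clicked_eq (mouse_pos : Int × Int) :
    sqare_clicked mouse_pos = sqare_clicked_alt mouse_pos := by
  unfold sqare_clicked sqare_clicked_alt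
  simp only [axis_fold, List.nil_append]

-- ===== VERDICT (by name: the statement is the Claim_ definition above) =====
theorem sqare_clicked_spec : Claim_equal_sqare_clicked := by
  intro mp _
  exact sqare_clicked_eq mp
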